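-- pv_equiv track=rewrite | github.com/arvindmittursundararajan/DevX-Tracker | api/gitlab_api.py | _get_recent_activity
-- ===== SOURCE A (Python) =====
-- from typing import Dict, List, Any
--
-- def _get_recent_activity(commits: List[Dict], merge_requests: List[Dict], issues: List[Dict]) -> List[Dict]:
--     """Get recent activity from all sources"""
--     activities = []
--
--     # Add commits
--     for commit in commits[:3]:
--         activities.append({
--             'type': 'commit',
--             'action': f"Committed: {commit.get('title', '')}",
--             'timestamp': commit.get('created_at', '')
--         })
--
--     # Add merge requests
--     for mr in merge_requests[:2]:
--         activities.append({
--             'type': 'merge_request',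
--             'action': f"Merge Request: {mr.get('title', '')}",
--             'timestamp': mr.get('created_at', '')
--         })
--
--     # Add issues
--     for issue in issues[:2]:
--         activities.append({
--             'type': 'issue',
--             'action': f"Issue: {issue.get('title', '')}",
--             'timestamp': issue.get('created_at', '')
--         })
--
--     return sorted(activities, key=lambda x: x['timestamp'], reverse=True)[:5]
-- ===== SOURCE B (Python) =====
-- def _get_recent_activity(commits, merge_requests, issues):
--     """Online insertion: thread each activity into a timestamp-descending
--     buffer as it is produced (no sorted() call), then take the first 5."""
--     top = []
--
--     def add(kind, prefix, item):
--         entry = {'type': kind,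
--                  'action': prefix + item.get('title', ''),
--                  'timestamp': item.get('created_at', '')}
--         i = 0
--         while i < len(top) and top[i]['timestamp'] >= entry['timestamp']:
--             i += 1
--         top.insert(i, entry)
--
--     for c in commits[:3]:
--         add('commit', 'Committed: ', c)
--     for m in merge_requests[:2]:
--         add('merge_request', 'Merge Request: ', m)
--     for it in issues[:2]:
--         add('issue', 'Issue: ', it)
--     return top[:5]
-- ===== Notes on version B (the rewrite author's own statement) =====
-- stated objective: alternative
-- what changed: B never builds the full activity list and never calls sorted(): it threads each entry as it is produced into a timestamp-descending buffer by online insertion (skip while buffered timestamp >= new, insert there), which reproduces the stable reverse sort, then returns the first 5.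
import Mathlib
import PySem

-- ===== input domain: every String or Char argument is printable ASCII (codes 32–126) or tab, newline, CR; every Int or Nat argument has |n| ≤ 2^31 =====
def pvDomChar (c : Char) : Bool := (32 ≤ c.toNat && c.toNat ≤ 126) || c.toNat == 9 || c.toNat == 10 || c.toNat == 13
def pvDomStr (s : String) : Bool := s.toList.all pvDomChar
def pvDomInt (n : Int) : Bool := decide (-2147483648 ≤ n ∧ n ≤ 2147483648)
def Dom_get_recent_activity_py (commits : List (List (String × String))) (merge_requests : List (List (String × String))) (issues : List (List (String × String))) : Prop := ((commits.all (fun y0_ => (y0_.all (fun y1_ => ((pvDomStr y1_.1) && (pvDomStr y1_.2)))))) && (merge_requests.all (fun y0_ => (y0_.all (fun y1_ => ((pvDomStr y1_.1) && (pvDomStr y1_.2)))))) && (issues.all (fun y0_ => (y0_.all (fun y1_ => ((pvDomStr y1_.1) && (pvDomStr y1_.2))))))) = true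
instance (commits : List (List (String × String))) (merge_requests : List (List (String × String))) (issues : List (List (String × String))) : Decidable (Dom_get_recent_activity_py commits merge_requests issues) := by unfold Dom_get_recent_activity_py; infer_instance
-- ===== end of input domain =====

-- B replaces A's build-everything-then-sorted() with an online insertion into a
-- timestamp-descending buffer (no sort call); objective: alternative algorithm.

-- ===== PORT A =====
-- x['timestamp'] ported as getD "": exact here, since every activity dict built by A carries "timestamp".
def pvTsKey (x : List (String × String)) : String := PySem.Dict.getD (PySem.Dict.mk x) "timestamp" ""

def get_recent_activity_py (commits : List (List (String × String))) (merge_requests : List (List (String × String))) (issues : List (List (String × String))) : List (List (String × String)) :=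
  let activities : List (List (String × String)) := []
  -- Add commits
  let activities := (PySem.List.slice commits none (some 3)).foldl (fun acc commit =>
    acc ++ [[("type", "commit"),
             ("action", "Committed: " ++ PySem.Dict.getD (PySem.Dict.mk commit) "title" ""),
             ("timestamp", PySem.Dict.getD (PySem.Dict.mk commit) "created_at" "")]]) activities
  -- Add merge requests
  let activities := (PySem.List.slice merge_requests none (some 2)).foldl (fun acc mr =>
    acc ++ [[("type", "merge_request"),
             ("action", "Merge Request: " ++ PySem.Dict.getD (PySem.Dict.mk mr) "title" ""),
             ("timestamp", PySem.Dict.getD (PySem.Dict.mk mr) "created_at" "")]]) activities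
  -- Add issues
  let activities := (PySem.List.slice issues none (some 2)).foldl (fun acc issue =>
    acc ++ [[("type", "issue"),
             ("action", "Issue: " ++ PySem.Dict.getD (PySem.Dict.mk issue) "title" ""),
             ("timestamp", PySem.Dict.getD (PySem.Dict.mk issue) "created_at" "")]]) activities
  PySem.List.slice (PySem.List.sorted activities pvTsKey true) none (some 5)

-- ===== PORT B =====
def pvMkEntry (ty prefix_ : String) (d : List (String × String)) : List (String × String) :=
  [("type", ty),
   ("action", prefix_ ++ PySem.Dict.getD (PySem.Dict.mk d) "title" ""),
   ("timestamp", PySem.Dict.getD (PySem.Dict.mk d) "created_at" "")]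

-- Source B's while-loop insertion: skip entries whose timestamp is ≥ the new one, insert there.
def pvInsertDesc (e : List (String × String)) : List (List (String × String)) → List (List (String × String))
  | [] => [e]
  | h :: t => if pvTsKey h < pvTsKey e then e :: h :: t else h :: pvInsertDesc e t

def get_recent_activity_py_alt (commits : List (List (String × String))) (merge_requests : List (List (String × String))) (issues : List (List (String × String))) : List (List (String × String)) :=
  let top : List (List (String × String)) := []
  let top := (PySem.List.slice commits none (some 3)).foldl (fun acc c =>
    pvInsertDesc (pvMkEntry "commit" "Committed: " c) acc) top
  let top := (PySem.List.slice merge_requests none (some 2)).foldl (fun acc m =>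
    pvInsertDesc (pvMkEntry "merge_request" "Merge Request: " m) acc) top
  let top := (PySem.List.slice issues none (some 2)).foldl (fun acc it =>
    pvInsertDesc (pvMkEntry "issue" "Issue: " it) acc) top
  PySem.List.slice top none (some 5)

-- ===== PRECONDITION & SPEC =====
def Spec_get_recent_activity_py (commits : List (List (String × String))) (merge_requests : List (List (String × String))) (issues : List (List (String × String))) (out : List (List (String × String))) : Prop := out = get_recent_activity_py_alt commits merge_requests issues
instance (commits : List (List (String × String))) (merge_requests : List (List (String × String))) (issues : List (List (String × String))) (out : List (List (String × String))) : Decidable (Spec_get_recent_activity_py commits merge_requests issues out) := by unfold Spec_get_recent_activity_py; infer_instance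

-- ===== CLAIM (what is proved, stated in full; the proofs are below) =====
def Claim_equal_get_recent_activity_py : Prop := ∀ (commits : List (List (String × String))) (merge_requests : List (List (String × String))) (issues : List (List (String × String))), Dom_get_recent_activity_py commits merge_requests issues → Spec_get_recent_activity_py commits merge_requests issues (get_recent_activity_py commits merge_requests issues)

-- ===== LEMMAS AND PROOFS =====
-- Source B's hand-written insertion is PySem's insertBy with the stable-descending predicate.
theorem pvInsertDesc_eq (e : List (String × String)) (l : List (List (String × String))) :
    pvInsertDesc e l = PySem.List.insertBy (fun a b => decide (pvTsKey b < pvTsKey a)) e l := by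
  induction l with
  | nil => rfl
  | cons h t ih =>
    simp only [pvInsertDesc, PySem.List.insertBy]
    by_cases hc : pvTsKey h < pvTsKey e
    · simp [hc]
    · simp [hc, ih]

-- ===== VERDICT (by name: the statement is the Claim_ definition above) =====
theorem get_recent_activity_py_spec : Claim_equal_get_recent_activity_py := by
  intro commits merge_requests issues _
  show _ = _
  unfold get_recent_activity_py get_recent_activity_py_alt
  simp only [PySem.List.foldl_append_singleton_eq_map, List.nil_append,
    PySem.List.sorted_rev_eq_foldl_insertBy, List.foldl_append, List.foldl_map,
    pvInsertDesc_eq, pvMkEntry]
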